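-- pv_equiv track=rewrite | github.com/thunder3596a/HaC | Docker-NonCritical/Tools/DocSight/modules/mb8611/driver.py | _map_ds_columns
-- ===== SOURCE A (Python) =====
-- def _map_ds_columns(headers):
--     col = {k: None for k in ("channel_id", "lock_status", "channel_type", "modulation",
--                               "frequency", "power", "snr", "corrected", "uncorrected")}
--     for i, h in enumerate(headers):
--         if "channel" in h and ("id" in h or "index" in h):
--             col["channel_id"] = i
--         elif "lock" in h:
--             col["lock_status"] = i
--         elif "channel" in h and "type" in h:
--             col["channel_type"] = i
--         elif "modulation" in h or "profile" in h:
--             col["modulation"] = i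
--         elif "freq" in h:
--             col["frequency"] = i
--         elif any(kw in h for kw in ("power", "receive", "level")):
--             col["power"] = i
--         elif "snr" in h or "mer" in h:
--             col["snr"] = i
--         elif "corrected" in h and "un" not in h:
--             col["corrected"] = i
--         elif "uncorrect" in h:
--             col["uncorrected"] = i
--     # positional fallbacks
--     if col["channel_id"] is None:
--         col["channel_id"] = 0
--     if col["lock_status"] is None:
--         col["lock_status"] = 1
--     if col["frequency"] is None:
--         col["frequency"] = 3
--     if col["corrected"] is None:
--         col["corrected"] = 6
--     if col["uncorrected"] is None:
--         col["uncorrected"] = 7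
--     return col
-- ===== SOURCE B (Python) =====
-- _DS_RULES = [
--     ("channel_id",   lambda h: "channel" in h and ("id" in h or "index" in h)),
--     ("lock_status",  lambda h: "lock" in h),
--     ("channel_type", lambda h: "channel" in h and "type" in h),
--     ("modulation",   lambda h: "modulation" in h or "profile" in h),
--     ("frequency",    lambda h: "freq" in h),
--     ("power",        lambda h: "power" in h or "receive" in h or "level" in h),
--     ("snr",          lambda h: "snr" in h or "mer" in h),
--     ("corrected",    lambda h: "corrected" in h and "un" not in h),
--     ("uncorrected",  lambda h: "uncorrect" in h),
-- ]
--
-- _DS_FALLBACK = {"channel_id": 0, "lock_status": 1, "frequency": 3,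
--                 "corrected": 6, "uncorrected": 7}
--
--
-- def _classify(h):
--     for role, pred in _DS_RULES:
--         if pred(h):
--             return role
--     return None
--
--
-- def _map_ds_columns(headers):
--     labels = [_classify(h) for h in headers]
--     col = {}
--     for role, _ in _DS_RULES:
--         idx = None
--         for j, lab in enumerate(labels):
--             if lab == role:
--                 idx = j
--         if idx is None:
--             idx = _DS_FALLBACK.get(role)
--         col[role] = idx
--     return col
-- ===== Notes on version B (the rewrite author's own statement) =====
-- stated objective: alternative
-- what changed: Replaces A's header-major if/elif ladder writing into a pre-seeded dict with fallback patch-up passes by a priority-ordered rule table: each header is classified once to its first matching role, then each role's column is computed independently as the last header classified to it, with a fallback lookup table for missing roles.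
import Mathlib
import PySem

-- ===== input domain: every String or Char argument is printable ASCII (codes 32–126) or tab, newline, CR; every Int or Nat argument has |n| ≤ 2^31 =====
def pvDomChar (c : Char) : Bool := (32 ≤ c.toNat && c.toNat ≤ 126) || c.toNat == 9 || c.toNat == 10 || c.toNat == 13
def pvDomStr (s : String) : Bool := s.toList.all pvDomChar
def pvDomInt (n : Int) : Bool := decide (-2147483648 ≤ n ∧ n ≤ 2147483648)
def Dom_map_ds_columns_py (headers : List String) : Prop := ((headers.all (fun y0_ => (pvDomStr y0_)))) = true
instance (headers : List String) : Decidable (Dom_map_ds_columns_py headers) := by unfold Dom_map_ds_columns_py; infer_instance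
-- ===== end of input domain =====

-- B replaces A's header-major elif ladder (last write wins into a dict) by a priority-ordered
-- rule table: classify each header once, then compute each role's column independently
-- (objective: alternative — a data-structure/decomposition change, same cost).

-- ===== PORT A =====
def pvStepA (d : PySem.Dict String (Option Int)) (p : Int × String) : PySem.Dict String (Option Int) :=
  let i := p.1
  let h := p.2
  if PySem.Str.isIn "channel" h && (PySem.Str.isIn "id" h || PySem.Str.isIn "index" h) then
    d.insert "channel_id" (some i)
  else if PySem.Str.isIn "lock" h then d.insert "lock_status" (some i)
  else if PySem.Str.isIn "channel" h && PySem.Str.isIn "type" h then d.insert "channel_type" (some i)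
  else if PySem.Str.isIn "modulation" h || PySem.Str.isIn "profile" h then d.insert "modulation" (some i)
  else if PySem.Str.isIn "freq" h then d.insert "frequency" (some i)
  else if (["power", "receive", "level"] : List String).any (fun kw => PySem.Str.isIn kw h) then
    d.insert "power" (some i)
  else if PySem.Str.isIn "snr" h || PySem.Str.isIn "mer" h then d.insert "snr" (some i)
  else if PySem.Str.isIn "corrected" h && !PySem.Str.isIn "un" h then d.insert "corrected" (some i)
  else if PySem.Str.isIn "uncorrect" h then d.insert "uncorrected" (some i)
  else d

-- 'if col[k] is None: col[k] = v'
def pvFixA (d : PySem.Dict String (Option Int)) (k : String) (v : Int) : PySem.Dict String (Option Int) :=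
  if d.getD k none = none then d.insert k (some v) else d

def map_ds_columns_py (headers : List String) : List (String × Option Int) :=
  let col0 := (["channel_id", "lock_status", "channel_type", "modulation", "frequency",
                "power", "snr", "corrected", "uncorrected"] : List String).foldl
      (fun d k => d.insert k (none : Option Int)) PySem.Dict.empty
  let col1 := (PySem.List.enumerate headers 0).foldl pvStepA col0
  let col2 := pvFixA col1 "channel_id" 0
  let col3 := pvFixA col2 "lock_status" 1
  let col4 := pvFixA col3 "frequency" 3
  let col5 := pvFixA col4 "corrected" 6
  let col6 := pvFixA col5 "uncorrected" 7
  col6.items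

-- ===== PORT B =====
def pvPredChannelId (h : String) : Bool := PySem.Str.isIn "channel" h && (PySem.Str.isIn "id" h || PySem.Str.isIn "index" h)
def pvPredLock (h : String) : Bool := PySem.Str.isIn "lock" h
def pvPredChannelType (h : String) : Bool := PySem.Str.isIn "channel" h && PySem.Str.isIn "type" h
def pvPredModulation (h : String) : Bool := PySem.Str.isIn "modulation" h || PySem.Str.isIn "profile" h
def pvPredFreq (h : String) : Bool := PySem.Str.isIn "freq" h
def pvPredPower (h : String) : Bool := PySem.Str.isIn "power" h || PySem.Str.isIn "receive" h || PySem.Str.isIn "level" h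
def pvPredSnr (h : String) : Bool := PySem.Str.isIn "snr" h || PySem.Str.isIn "mer" h
def pvPredCorrected (h : String) : Bool := PySem.Str.isIn "corrected" h && !PySem.Str.isIn "un" h
def pvPredUncorrected (h : String) : Bool := PySem.Str.isIn "uncorrect" h

def pvRules : List (String × (String → Bool)) :=
  [("channel_id", pvPredChannelId), ("lock_status", pvPredLock), ("channel_type", pvPredChannelType),
   ("modulation", pvPredModulation), ("frequency", pvPredFreq), ("power", pvPredPower),
   ("snr", pvPredSnr), ("corrected", pvPredCorrected), ("uncorrected", pvPredUncorrected)]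

def pvFallbackDict : PySem.Dict String Int :=
  PySem.Dict.mk [("channel_id", 0), ("lock_status", 1), ("frequency", 3), ("corrected", 6), ("uncorrected", 7)]

-- first matching rule, as in Source B's _classify loop
def pvClassify (h : String) : Option String :=
  (pvRules.find? (fun r => r.2 h)).map (·.1)

def map_ds_columns_py_alt (headers : List String) : List (String × Option Int) :=
  let labels := headers.map pvClassify
  (pvRules.foldl (fun col r =>
      let idx0 := (PySem.List.enumerate labels 0).foldl
        (fun acc p => if p.2 == some r.1 then some p.1 else acc) (none : Option Int)
      let idx : Option Int := if idx0 = none then pvFallbackDict.get? r.1 else idx0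
      col.insert r.1 idx) PySem.Dict.empty).items

-- ===== PRECONDITION & SPEC =====
def Spec_map_ds_columns_py (headers : List String) (out : List (String × Option Int)) : Prop := out = map_ds_columns_py_alt headers
instance (headers : List String) (out : List (String × Option Int)) : Decidable (Spec_map_ds_columns_py headers out) := by unfold Spec_map_ds_columns_py; infer_instance

-- ===== CLAIM (what is proved, stated in full; the proofs are below) =====
def Claim_equal_map_ds_columns_py : Prop := ∀ (headers : List String), Dom_map_ds_columns_py headers → Spec_map_ds_columns_py headers (map_ds_columns_py headers)

-- ===== LEMMAS AND PROOFS =====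

/-- Dict of the fixed nine role keys, in A's (and B's) insertion order. -/
def mk9 (a b c d e f g h i : Option Int) : PySem.Dict String (Option Int) :=
  PySem.Dict.mk [("channel_id", a), ("lock_status", b), ("channel_type", c), ("modulation", d),
                 ("frequency", e), ("power", f), ("snr", g), ("corrected", h), ("uncorrected", i)]

/-- last index (counting from n) in hs whose header classifies to role r, else acc. -/
def pvLast (hs : List String) (n : Int) (r : String) (acc : Option Int) : Option Int :=
  (PySem.List.enumerate hs n).foldl (fun acc p => if pvClassify p.2 == some r then some p.1 else acc) acc

lemma pvLast_nil (n : Int) (r : String) (acc : Option Int) : pvLast [] n r acc = acc := by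
  simp [pvLast, PySem.List.enumerate_nil]

lemma pvLast_cons (x : String) (xs : List String) (n : Int) (r : String) (acc : Option Int) :
    pvLast (x :: xs) n r acc = pvLast xs (n + 1) r (if pvClassify x == some r then some n else acc) := by
  simp [pvLast, PySem.List.enumerate_cons]

set_option maxHeartbeats 1000000 in
lemma step_mk9 (a b c d e f g h i : Option Int) (n : Int) (s : String) :
    pvStepA (mk9 a b c d e f g h i) (n, s) =
      mk9 (if pvClassify s == some "channel_id" then some n else a)
          (if pvClassify s == some "lock_status" then some n else b)
          (if pvClassify s == some "channel_type" then some n else c)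
          (if pvClassify s == some "modulation" then some n else d)
          (if pvClassify s == some "frequency" then some n else e)
          (if pvClassify s == some "power" then some n else f)
          (if pvClassify s == some "snr" then some n else g)
          (if pvClassify s == some "corrected" then some n else h)
          (if pvClassify s == some "uncorrected" then some n else i) := by
  simp only [pvStepA, pvClassify, pvRules, pvPredChannelId, pvPredLock, pvPredChannelType,
    pvPredModulation, pvPredFreq, pvPredPower, pvPredSnr, pvPredCorrected,
    pvPredUncorrected, List.any_cons, List.any_nil, Bool.or_false, Bool.or_assoc, List.find?]
  cases Bool.eq_false_or_eq_true (PySem.Str.isIn "channel" s && (PySem.Str.isIn "id" s || PySem.Str.isIn "index" s)) with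
  | inl h1 =>
      simp only [h1]
      simp [mk9, PySem.Dict.insert, PySem.Dict.contains]
  | inr h1 =>
      cases Bool.eq_false_or_eq_true (PySem.Str.isIn "lock" s) with
      | inl h2 =>
          simp only [h1, h2]
          simp [mk9, PySem.Dict.insert, PySem.Dict.contains]
      | inr h2 =>
          cases Bool.eq_false_or_eq_true (PySem.Str.isIn "channel" s && PySem.Str.isIn "type" s) with
          | inl h3 =>
              simp only [h1, h2, h3]
              simp [mk9, PySem.Dict.insert, PySem.Dict.contains]
          | inr h3 =>
              cases Bool.eq_false_or_eq_true (PySem.Str.isIn "modulation" s || PySem.Str.isIn "profile" s) with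
              | inl h4 =>
                  simp only [h1, h2, h3, h4]
                  simp [mk9, PySem.Dict.insert, PySem.Dict.contains]
              | inr h4 =>
                  cases Bool.eq_false_or_eq_true (PySem.Str.isIn "freq" s) with
                  | inl h5 =>
                      simp only [h1, h2, h3, h4, h5]
                      simp [mk9, PySem.Dict.insert, PySem.Dict.contains]
                  | inr h5 =>
                      cases Bool.eq_false_or_eq_true (PySem.Str.isIn "power" s || (PySem.Str.isIn "receive" s || PySem.Str.isIn "level" s)) with
                      | inl h6 =>
                          simp only [h1, h2, h3, h4, h5, h6]
                          simp [mk9, PySem.Dict.insert, PySem.Dict.contains]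
                      | inr h6 =>
                          cases Bool.eq_false_or_eq_true (PySem.Str.isIn "snr" s || PySem.Str.isIn "mer" s) with
                          | inl h7 =>
                              simp only [h1, h2, h3, h4, h5, h6, h7]
                              simp [mk9, PySem.Dict.insert, PySem.Dict.contains]
                          | inr h7 =>
                              cases Bool.eq_false_or_eq_true (PySem.Str.isIn "corrected" s && !PySem.Str.isIn "un" s) with
                              | inl h8 =>
                                  simp only [h1, h2, h3, h4, h5, h6, h7, h8]
                                  simp [mk9, PySem.Dict.insert, PySem.Dict.contains]
                              | inr h8 =>
                                  cases Bool.eq_false_or_eq_true (PySem.Str.isIn "uncorrect" s) with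
                                  | inl h9 =>
                                      simp only [h1, h2, h3, h4, h5, h6, h7, h8, h9]
                                      simp [mk9, PySem.Dict.insert, PySem.Dict.contains]
                                  | inr h9 =>
                                      simp only [h1, h2, h3, h4, h5, h6, h7, h8, h9]
                                      simp [mk9, PySem.Dict.insert, PySem.Dict.contains]

lemma fold_mk9 (hs : List String) (n : Int) (a b c d e f g h i : Option Int) :
    (PySem.List.enumerate hs n).foldl pvStepA (mk9 a b c d e f g h i) =
      mk9 (pvLast hs n "channel_id" a) (pvLast hs n "lock_status" b) (pvLast hs n "channel_type" c)
          (pvLast hs n "modulation" d) (pvLast hs n "frequency" e) (pvLast hs n "power" f)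
          (pvLast hs n "snr" g) (pvLast hs n "corrected" h) (pvLast hs n "uncorrected" i) := by
  induction hs generalizing n a b c d e f g h i with
  | nil => simp [PySem.List.enumerate_nil, pvLast_nil]
  | cons x xs ih =>
      rw [PySem.List.enumerate_cons]
      simp only [List.foldl_cons, step_mk9, ih, pvLast_cons]

lemma enumerate_map {α β : Type} (f : α → β) (xs : List α) (n : Int) :
    PySem.List.enumerate (xs.map f) n = (PySem.List.enumerate xs n).map (fun p => (p.1, f p.2)) := by
  induction xs generalizing n with
  | nil => simp [PySem.List.enumerate_nil]
  | cons x xs ih => simp [PySem.List.enumerate_cons, ih]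

lemma inner_fold_eq_pvLast (headers : List String) (r : String) (acc : Option Int) :
    (PySem.List.enumerate (headers.map pvClassify) 0).foldl
        (fun acc p => if p.2 == some r then some p.1 else acc) acc =
      pvLast headers 0 r acc := by
  rw [enumerate_map, List.foldl_map, pvLast]

lemma if_none_id (o : Option Int) : (if o = none then none else o) = o := by
  cases o <;> simp

-- ===== VERDICT (by name: the statement is the Claim_ definition above) =====
set_option maxHeartbeats 4000000 in
theorem map_ds_columns_py_spec : Claim_equal_map_ds_columns_py := by
  intro headers _
  unfold Spec_map_ds_columns_py
  have hcol0 : (["channel_id", "lock_status", "channel_type", "modulation", "frequency",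
                "power", "snr", "corrected", "uncorrected"] : List String).foldl
      (fun d k => d.insert k (none : Option Int)) PySem.Dict.empty =
      mk9 none none none none none none none none none := by decide
  simp only [map_ds_columns_py, map_ds_columns_py_alt, hcol0, fold_mk9,
    pvRules, List.foldl_cons, List.foldl_nil, inner_fold_eq_pvLast]
  cases h1 : pvLast headers 0 "channel_id" none <;>
  cases h2 : pvLast headers 0 "lock_status" none <;>
  cases h3 : pvLast headers 0 "frequency" none <;>
  cases h4 : pvLast headers 0 "corrected" none <;>
  cases h5 : pvLast headers 0 "uncorrected" none <;>
    simp [pvFixA, mk9, PySem.Dict.insert, PySem.Dict.contains, PySem.Dict.getD,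
      PySem.Dict.get?, PySem.Dict.empty, pvFallbackDict, List.find?, List.any,
      h1, h2, h3, h4, h5, if_none_id]
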